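-- pv_equiv track=rewrite | github.com/Umang-Lodaya/LeetCode-Questions | Surround the 1's - GFG/surround-the-1s.py | Count
-- ===== SOURCE A (Python) =====
-- def Count(matrix):
--     ans = 0
--     n = len(matrix)
--     m = len(matrix[0])
--
--     for i in range(n):
--         for j in range(m):
--             count = 0
--             if matrix[i][j] == 1:
--                 if i < n - 1 and matrix[i + 1][j] == 0:
--                     count += 1
--                 if i > 0 and matrix[i - 1][j] == 0:
--                     count += 1
--                 if j < m - 1 and matrix[i][j + 1] == 0:
--                     count += 1
--                 if j > 0 and matrix[i][j - 1] == 0: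
--                     count += 1
--
--                 if i < n - 1 and j < m - 1:
--                     if matrix[i + 1][j + 1] == 0:
--                         count += 1
--                 if i > 0 and j > 0:
--                     if matrix[i - 1][j - 1] == 0:
--                         count += 1
--                 if i > 0 and j < m - 1:
--                     if matrix[i - 1][j + 1] == 0:
--                         count += 1
--                 if i < n - 1 and j > 0:
--                     if matrix[i + 1][j - 1] == 0:
--                         count += 1
--
--             if count > 0 and count % 2 == 0:
--                 ans += 1
--
--     return ans
-- ===== SOURCE B (Python) =====
-- def Count(matrix):
--     n = len(matrix)
--     m = len(matrix[0])
--     hits = {}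
--     for i in range(n):
--         for j in range(m):
--             if matrix[i][j] == 0:
--                 for ni in range(i - 1, i + 2):
--                     for nj in range(j - 1, j + 2):
--                         if not (ni == i and nj == j) and 0 <= ni < n and 0 <= nj < m:
--                             hits[(ni, nj)] = hits.get((ni, nj), 0) + 1
--     ans = 0
--     for i in range(n):
--         for j in range(m):
--             c = hits.get((i, j), 0)
--             if matrix[i][j] == 1 and c > 0 and c % 2 == 0:
--                 ans += 1
--     return ans
-- ===== Notes on version B (the rewrite author's own statement) =====
-- stated objective: alternative
-- what changed: Instead of gathering, per 1-cell, its zero neighbours through eight hard-coded guarded probes, B makes one scatter pass in which every 0-cell increments a hash-map counter for each of its in-bounds neighbours, and a second pass reads that counter at each 1-cell.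
import Mathlib
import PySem

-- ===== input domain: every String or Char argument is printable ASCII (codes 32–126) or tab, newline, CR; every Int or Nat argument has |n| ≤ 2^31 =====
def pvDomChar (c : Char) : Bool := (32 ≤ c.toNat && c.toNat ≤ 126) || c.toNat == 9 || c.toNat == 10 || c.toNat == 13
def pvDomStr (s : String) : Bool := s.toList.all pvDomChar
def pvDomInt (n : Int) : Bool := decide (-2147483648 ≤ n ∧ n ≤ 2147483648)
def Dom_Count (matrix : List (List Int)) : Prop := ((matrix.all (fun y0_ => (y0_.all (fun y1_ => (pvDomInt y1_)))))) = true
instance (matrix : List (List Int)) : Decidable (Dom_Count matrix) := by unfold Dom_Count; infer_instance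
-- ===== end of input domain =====

-- B replaces A's eight hard-coded guarded neighbour probes per 1-cell by a scatter pass: every
-- 0-cell increments a dict counter for each in-bounds neighbour, then a second pass reads the
-- counter at each 1-cell (objective: alternative decomposition, same asymptotic cost).

-- ===== PORT A =====
-- matrix[i][j] as both Pythons read it (all reads are at guarded non-negative indices)
def pvCell (matrix : List (List Int)) (i j : Int) : Int :=
  PySem.List.pyGetD (PySem.List.pyGetD matrix i []) j 0

-- the `count` that A accumulates for cell (i, j) through its chain of guarded increments
def pvCountA (matrix : List (List Int)) (n m i j : Int) : Int :=
  if pvCell matrix i j = 1 then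
    let c1 : Int := if i < n - 1 ∧ pvCell matrix (i+1) j = 0 then 0 + 1 else 0
    let c2 := if i > 0 ∧ pvCell matrix (i-1) j = 0 then c1 + 1 else c1
    let c3 := if j < m - 1 ∧ pvCell matrix i (j+1) = 0 then c2 + 1 else c2
    let c4 := if j > 0 ∧ pvCell matrix i (j-1) = 0 then c3 + 1 else c3
    let c5 := if i < n - 1 ∧ j < m - 1 ∧ pvCell matrix (i+1) (j+1) = 0 then c4 + 1 else c4
    let c6 := if i > 0 ∧ j > 0 ∧ pvCell matrix (i-1) (j-1) = 0 then c5 + 1 else c5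
    let c7 := if i > 0 ∧ j < m - 1 ∧ pvCell matrix (i-1) (j+1) = 0 then c6 + 1 else c6
    let c8 := if i < n - 1 ∧ j > 0 ∧ pvCell matrix (i+1) (j-1) = 0 then c7 + 1 else c7
    c8
  else 0

def Count (matrix : List (List Int)) : Int :=
  let n : Int := matrix.length
  let m : Int := (PySem.List.pyGetD matrix 0 []).length
  List.foldl (fun ans i =>
    List.foldl (fun ans j =>
      let count := pvCountA matrix n m i j
      if count > 0 ∧ PySem.Int.mod count 2 = 0 then ans + 1 else ans)
      ans (PySem.List.pyRange 0 m))
    0 (PySem.List.pyRange 0 n)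

-- ===== PORT B =====
-- first pass of B: every 0-cell increments hits[(ni, nj)] for each in-bounds neighbour
def pvScatter (matrix : List (List Int)) (n m : Int) : PySem.Dict (Int × Int) Int :=
  List.foldl (fun d i =>
    List.foldl (fun d j =>
      if pvCell matrix i j = 0 then
        List.foldl (fun d ni =>
          List.foldl (fun d nj =>
            if (¬(ni = i ∧ nj = j)) ∧ (0 ≤ ni ∧ ni < n) ∧ (0 ≤ nj ∧ nj < m) then
              d.insert (ni, nj) (d.getD (ni, nj) 0 + 1)
            else d)
            d (PySem.List.pyRange (j-1) (j+2)))
          d (PySem.List.pyRange (i-1) (i+2))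
      else d)
      d (PySem.List.pyRange 0 m))
    PySem.Dict.empty (PySem.List.pyRange 0 n)

def Count_alt (matrix : List (List Int)) : Int :=
  let n : Int := matrix.length
  let m : Int := (PySem.List.pyGetD matrix 0 []).length
  let hits := pvScatter matrix n m
  List.foldl (fun ans i =>
    List.foldl (fun ans j =>
      let c := hits.getD (i, j) 0
      if pvCell matrix i j = 1 ∧ c > 0 ∧ PySem.Int.mod c 2 = 0 then ans + 1 else ans)
      ans (PySem.List.pyRange 0 m))
    0 (PySem.List.pyRange 0 n)

-- ===== PRECONDITION & SPEC =====
-- Pre_ excludes exactly the inputs on which Python A raises IndexError: the empty matrix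
-- (matrix[0]) and matrices with a row shorter than the first row (matrix[i][j], j < m).
def Pre_Count (matrix : List (List Int)) : Prop :=
  matrix ≠ [] ∧ ∀ row ∈ matrix, (PySem.List.pyGetD matrix 0 []).length ≤ row.length
instance (matrix : List (List Int)) : Decidable (Pre_Count matrix) := by
  unfold Pre_Count; infer_instance

def pvWitness_Count : List (List Int) := [[1, 0], [0, 1]]

def Spec_Count (matrix : List (List Int)) (out : Int) : Prop := out = Count_alt matrix
instance (matrix : List (List Int)) (out : Int) : Decidable (Spec_Count matrix out) := by
  unfold Spec_Count; infer_instance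

-- ===== CLAIM (what is proved, stated in full; the proofs are below) =====
def Claim_equal_Count : Prop :=
  ∀ (matrix : List (List Int)), Dom_Count matrix → Pre_Count matrix → Spec_Count matrix (Count matrix)

-- ===== LEMMAS AND PROOFS =====

-- contribution of cell (p, q) of the scatter pass to the counter at key (i, j)
def pvScat (matrix : List (List Int)) (n m i j p q : Int) : Int :=
  if (p - 1 ≤ i ∧ i ≤ p + 1) ∧ (q - 1 ≤ j ∧ j ≤ q + 1) ∧ (0 ≤ p ∧ p < n) ∧ (0 ≤ q ∧ q < m) ∧
     (¬(i = p ∧ j = q)) ∧ pvCell matrix p q = 0 then 1 else 0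

lemma pyRange_triple (a : Int) : PySem.List.pyRange (a-1) (a+2) = [a-1, a, a+1] := by
  rw [PySem.List.pyRange_one_cons (by omega), PySem.List.pyRange_one_cons (by omega),
      PySem.List.pyRange_one_cons (by omega)]
  norm_num
  simp [PySem.List.pyRange]
  omega

lemma getD_condInsert (d : PySem.Dict (Int × Int) Int) (c : Prop) [Decidable c]
    (k key : Int × Int) :
    (if c then d.insert k (d.getD k 0 + 1) else d).getD key 0 =
      d.getD key 0 + (if c ∧ key = k then 1 else 0) := by
  by_cases hc : c
  · rw [if_pos hc, PySem.Dict.getD_insert]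
    by_cases hk : key = k
    · rw [if_pos hk, if_pos ⟨hc, hk⟩, hk]
    · rw [if_neg hk, if_neg (fun h => hk h.2)]; ring
  · rw [if_neg hc, if_neg (fun h => hc h.1)]; ring

lemma getD_foldl_sum {α : Type} (l : List α)
    (step : PySem.Dict (Int × Int) Int → α → PySem.Dict (Int × Int) Int)
    (contrib : α → Int) (key : Int × Int)
    (h : ∀ d a, a ∈ l → (step d a).getD key 0 = d.getD key 0 + contrib a) :
    ∀ d, (List.foldl step d l).getD key 0 = d.getD key 0 + (l.map contrib).sum := by
  induction l with
  | nil => intro d; simp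
  | cons x t ih =>
    intro d
    simp only [List.foldl_cons, List.map_cons, List.sum_cons]
    rw [ih (fun d a ha => h d a (List.mem_cons_of_mem x ha)) (step d x),
        h d x (List.mem_cons_self)]
    ring

set_option maxHeartbeats 2000000 in
lemma getD_scatterCell (matrix : List (List Int)) (n m i j p q : Int)
    (d : PySem.Dict (Int × Int) Int)
    (hp : 0 ≤ p ∧ p < n) (hq : 0 ≤ q ∧ q < m)
    (hi : 0 ≤ i ∧ i < n) (hj : 0 ≤ j ∧ j < m) :
    ((if pvCell matrix p q = 0 then
        List.foldl (fun d ni =>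
          List.foldl (fun d nj =>
            if (¬(ni = p ∧ nj = q)) ∧ (0 ≤ ni ∧ ni < n) ∧ (0 ≤ nj ∧ nj < m) then
              d.insert (ni, nj) (d.getD (ni, nj) 0 + 1)
            else d)
            d (PySem.List.pyRange (q-1) (q+2)))
          d (PySem.List.pyRange (p-1) (p+2))
      else d).getD (i, j) 0) = d.getD (i, j) 0 + pvScat matrix n m i j p q := by
  by_cases hz : pvCell matrix p q = 0
  · rw [if_pos hz,
        getD_foldl_sum _ _ (fun ni => ((PySem.List.pyRange (q-1) (q+2)).map (fun nj =>
            if ((¬(ni = p ∧ nj = q)) ∧ (0 ≤ ni ∧ ni < n) ∧ (0 ≤ nj ∧ nj < m)) ∧ (i, j) = (ni, nj) then (1:Int) else 0)).sum) (i, j)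
          (fun d ni _ => by
            exact getD_foldl_sum _ _ (fun nj =>
                if ((¬(ni = p ∧ nj = q)) ∧ (0 ≤ ni ∧ ni < n) ∧ (0 ≤ nj ∧ nj < m)) ∧ (i, j) = (ni, nj) then (1:Int) else 0) (i, j)
              (fun d nj _ => getD_condInsert d _ (ni, nj) (i, j)) d)]
    rw [pyRange_triple, pyRange_triple]
    simp only [List.map_cons, List.map_nil, List.sum_cons, List.sum_nil, Prod.mk.injEq]
    simp only [pvScat, hz, and_true]
    have tw : ∀ (c1 c2 : Prop) [Decidable c1] [Decidable c2], (c1 ↔ c2) → (if c1 then (1:Int) else 0) = (if c2 then 1 else 0) := fun c1 c2 _ _ h => if_congr h rfl rfl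
    rw [tw ((¬(p - 1 = p ∧ q - 1 = q) ∧ (0 ≤ p - 1 ∧ p - 1 < n) ∧ 0 ≤ q - 1 ∧ q - 1 < m) ∧ i = p - 1 ∧ j = q - 1) (i = p - 1 ∧ j = q - 1) (by omega),
        tw ((¬p - 1 = p ∧ (0 ≤ p - 1 ∧ p - 1 < n) ∧ 0 ≤ q ∧ q < m) ∧ i = p - 1 ∧ j = q) (i = p - 1 ∧ j = q) (by omega),
        tw ((¬(p - 1 = p ∧ q + 1 = q) ∧ (0 ≤ p - 1 ∧ p - 1 < n) ∧ 0 ≤ q + 1 ∧ q + 1 < m) ∧ i = p - 1 ∧ j = q + 1) (i = p - 1 ∧ j = q + 1) (by omega),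
        tw ((¬(True ∧ q - 1 = q) ∧ (0 ≤ p ∧ p < n) ∧ 0 ≤ q - 1 ∧ q - 1 < m) ∧ i = p ∧ j = q - 1) (i = p ∧ j = q - 1) (by simp; omega),
        tw ((¬True ∧ (0 ≤ p ∧ p < n) ∧ 0 ≤ q ∧ q < m) ∧ i = p ∧ j = q) False (by simp),
        tw ((¬(True ∧ q + 1 = q) ∧ (0 ≤ p ∧ p < n) ∧ 0 ≤ q + 1 ∧ q + 1 < m) ∧ i = p ∧ j = q + 1) (i = p ∧ j = q + 1) (by simp; omega),
        tw ((¬(p + 1 = p ∧ q - 1 = q) ∧ (0 ≤ p + 1 ∧ p + 1 < n) ∧ 0 ≤ q - 1 ∧ q - 1 < m) ∧ i = p + 1 ∧ j = q - 1) (i = p + 1 ∧ j = q - 1) (by omega),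
        tw ((¬p + 1 = p ∧ (0 ≤ p + 1 ∧ p + 1 < n) ∧ 0 ≤ q ∧ q < m) ∧ i = p + 1 ∧ j = q) (i = p + 1 ∧ j = q) (by omega),
        tw ((¬(p + 1 = p ∧ q + 1 = q) ∧ (0 ≤ p + 1 ∧ p + 1 < n) ∧ 0 ≤ q + 1 ∧ q + 1 < m) ∧ i = p + 1 ∧ j = q + 1) (i = p + 1 ∧ j = q + 1) (by omega),
        if_neg not_false]
    split_ifs <;> omega
  · rw [if_neg hz, pvScat, if_neg (fun h => hz h.2.2.2.2.2)]; ring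

lemma sum_single (l : List Int) (hnd : l.Nodup) (a : Int) (g : Int → Int) :
    (l.map (fun p => if p = a then g p else 0)).sum = if a ∈ l then g a else 0 := by
  induction l with
  | nil => simp
  | cons x t ih =>
    simp only [List.map_cons, List.sum_cons, List.mem_cons]
    rcases List.nodup_cons.mp hnd with ⟨hx, ht⟩
    by_cases hxa : x = a
    · subst hxa
      rw [ih ht, if_pos rfl, if_pos (Or.inl rfl), if_neg hx]; ring
    · rw [if_neg hxa, ih ht]
      by_cases hat : a ∈ t
      · rw [if_pos hat, if_pos (Or.inr hat)]; ring
      · rw [if_neg hat, if_neg (by rintro (h | h); exact hxa h.symm; exact hat h)]; ring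

lemma sum_three (n x : Int) (g : Int → Int) (h0 : 0 ≤ x) (h1 : x < n)
    (hs : ∀ p, ¬(p = x - 1 ∨ p = x ∨ p = x + 1) → g p = 0)
    (hlow : x = 0 → g (x - 1) = 0) (hhigh : x = n - 1 → g (x + 1) = 0) :
    ((PySem.List.pyRange 0 n).map g).sum = g (x - 1) + g x + g (x + 1) := by
  have key : ∀ p ∈ PySem.List.pyRange 0 n,
      g p = ((fun p => if p = x - 1 then g p else 0) p
            + (fun p => if p = x then g p else 0) p)
            + (fun p => if p = x + 1 then g p else 0) p := by
    intro p _
    simp only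
    split_ifs with a b c <;> try omega
    rw [hs p (by tauto)]; norm_num
  rw [List.map_congr_left key,
      PySem.List.sum_map_add_int _ (fun p => (if p = x - 1 then g p else 0) + (if p = x then g p else 0)) (fun p => if p = x + 1 then g p else 0),
      PySem.List.sum_map_add_int _ (fun p => if p = x - 1 then g p else 0) (fun p => if p = x then g p else 0),
      sum_single _ (PySem.List.nodup_pyRange_one 0 n),
      sum_single _ (PySem.List.nodup_pyRange_one 0 n),
      sum_single _ (PySem.List.nodup_pyRange_one 0 n)]
  simp only [PySem.List.mem_pyRange_one]
  by_cases hx0 : 0 ≤ x - 1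
  · rw [if_pos ⟨hx0, by omega⟩, if_pos ⟨h0, h1⟩]
    by_cases hxn : x + 1 < n
    · rw [if_pos ⟨by omega, hxn⟩]
    · rw [if_neg (by omega), hhigh (by omega)]
  · rw [if_neg (by omega), if_pos ⟨h0, h1⟩, hlow (by omega)]
    by_cases hxn : x + 1 < n
    · rw [if_pos ⟨by omega, hxn⟩]
    · rw [if_neg (by omega), hhigh (by omega)]

lemma hits_getD (matrix : List (List Int)) (n m i j : Int)
    (hi : 0 ≤ i ∧ i < n) (hj : 0 ≤ j ∧ j < m) :
    (pvScatter matrix n m).getD (i, j) 0 =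
      ((pvScat matrix n m i j (i-1) (j-1) + pvScat matrix n m i j (i-1) j + pvScat matrix n m i j (i-1) (j+1))
      + (pvScat matrix n m i j i (j-1) + pvScat matrix n m i j i j + pvScat matrix n m i j i (j+1)))
      + (pvScat matrix n m i j (i+1) (j-1) + pvScat matrix n m i j (i+1) j + pvScat matrix n m i j (i+1) (j+1)) := by
  have hrow : ∀ p, ((PySem.List.pyRange 0 m).map (fun q => pvScat matrix n m i j p q)).sum =
      pvScat matrix n m i j p (j-1) + pvScat matrix n m i j p j + pvScat matrix n m i j p (j+1) := by
    intro p
    apply sum_three m j _ hj.1 hj.2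
    · intro q hq; rw [pvScat, if_neg (fun h => hq (by omega))]
    · intro h; rw [pvScat, if_neg (fun hc => by omega)]
    · intro h; rw [pvScat, if_neg (fun hc => by omega)]
  rw [pvScatter,
      getD_foldl_sum _ _ (fun p => ((PySem.List.pyRange 0 m).map (fun q => pvScat matrix n m i j p q)).sum) (i, j)
        (fun d p hpm => by
          rw [PySem.List.mem_pyRange_one] at hpm
          exact getD_foldl_sum _ _ (fun q => pvScat matrix n m i j p q) (i, j)
            (fun d q hqm => getD_scatterCell matrix n m i j p q d hpm
              (PySem.List.mem_pyRange_one.mp hqm) hi hj) d),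
      PySem.Dict.getD_empty]
  rw [sum_three n i _ hi.1 hi.2
      (fun p hp => by rw [hrow p]; simp only [pvScat]
                      rw [if_neg (fun h => hp (by omega)), if_neg (fun h => hp (by omega)),
                          if_neg (fun h => hp (by omega))]; ring)
      (fun h => by rw [hrow]; simp only [pvScat]
                   rw [if_neg (fun hc => by omega), if_neg (fun hc => by omega),
                       if_neg (fun hc => by omega)]; ring)
      (fun h => by rw [hrow]; simp only [pvScat]
                   rw [if_neg (fun hc => by omega), if_neg (fun hc => by omega),
                       if_neg (fun hc => by omega)]; ring)]
  rw [hrow, hrow, hrow]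
  ring

lemma cell_eq (matrix : List (List Int)) (n m i j : Int)
    (hi : 0 ≤ i ∧ i < n) (hj : 0 ≤ j ∧ j < m) (h1 : pvCell matrix i j = 1) :
    pvCountA matrix n m i j = (pvScatter matrix n m).getD (i, j) 0 := by
  rw [hits_getD matrix n m i j hi hj]
  have e1 : pvScat matrix n m i j (i-1) (j-1)
      = (if i > 0 ∧ j > 0 ∧ pvCell matrix (i-1) (j-1) = 0 then (1:Int) else 0) := by
    rw [pvScat]
    refine if_congr ⟨fun h => ⟨by omega, by omega, h.2.2.2.2.2⟩,
      fun h => ⟨by omega, by omega, by omega, by omega, by omega, h.2.2⟩⟩ rfl rfl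
  have e2 : pvScat matrix n m i j (i-1) j
      = (if i > 0 ∧ pvCell matrix (i-1) j = 0 then (1:Int) else 0) := by
    rw [pvScat]
    refine if_congr ⟨fun h => ⟨by omega, h.2.2.2.2.2⟩,
      fun h => ⟨by omega, by omega, by omega, by omega, by omega, h.2⟩⟩ rfl rfl
  have e3 : pvScat matrix n m i j (i-1) (j+1)
      = (if i > 0 ∧ j < m - 1 ∧ pvCell matrix (i-1) (j+1) = 0 then (1:Int) else 0) := by
    rw [pvScat]
    refine if_congr ⟨fun h => ⟨by omega, by omega, h.2.2.2.2.2⟩,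
      fun h => ⟨by omega, by omega, by omega, by omega, by omega, h.2.2⟩⟩ rfl rfl
  have e4 : pvScat matrix n m i j i (j-1)
      = (if j > 0 ∧ pvCell matrix i (j-1) = 0 then (1:Int) else 0) := by
    rw [pvScat]
    refine if_congr ⟨fun h => ⟨by omega, h.2.2.2.2.2⟩,
      fun h => ⟨by omega, by omega, by omega, by omega, by omega, h.2⟩⟩ rfl rfl
  have e5 : pvScat matrix n m i j i j = 0 := by
    rw [pvScat, if_neg]; rintro ⟨-, -, -, -, hne, -⟩; exact hne ⟨rfl, rfl⟩
  have e6 : pvScat matrix n m i j i (j+1)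
      = (if j < m - 1 ∧ pvCell matrix i (j+1) = 0 then (1:Int) else 0) := by
    rw [pvScat]
    refine if_congr ⟨fun h => ⟨by omega, h.2.2.2.2.2⟩,
      fun h => ⟨by omega, by omega, by omega, by omega, by omega, h.2⟩⟩ rfl rfl
  have e7 : pvScat matrix n m i j (i+1) (j-1)
      = (if i < n - 1 ∧ j > 0 ∧ pvCell matrix (i+1) (j-1) = 0 then (1:Int) else 0) := by
    rw [pvScat]
    refine if_congr ⟨fun h => ⟨by omega, by omega, h.2.2.2.2.2⟩,
      fun h => ⟨by omega, by omega, by omega, by omega, by omega, h.2.2⟩⟩ rfl rfl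
  have e8 : pvScat matrix n m i j (i+1) j
      = (if i < n - 1 ∧ pvCell matrix (i+1) j = 0 then (1:Int) else 0) := by
    rw [pvScat]
    refine if_congr ⟨fun h => ⟨by omega, h.2.2.2.2.2⟩,
      fun h => ⟨by omega, by omega, by omega, by omega, by omega, h.2⟩⟩ rfl rfl
  have e9 : pvScat matrix n m i j (i+1) (j+1)
      = (if i < n - 1 ∧ j < m - 1 ∧ pvCell matrix (i+1) (j+1) = 0 then (1:Int) else 0) := by
    rw [pvScat]
    refine if_congr ⟨fun h => ⟨by omega, by omega, h.2.2.2.2.2⟩,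
      fun h => ⟨by omega, by omega, by omega, by omega, by omega, h.2.2⟩⟩ rfl rfl
  rw [e1, e2, e3, e4, e5, e6, e7, e8, e9]
  have step : ∀ (c : Prop) [Decidable c] (x : Int), (if c then x + 1 else x) = x + (if c then (1:Int) else 0) := by
    intro c _ x; split_ifs <;> ring
  rw [pvCountA, if_pos h1]
  simp only [step]
  ring

-- ===== VERDICT (by name: the statement is the Claim_ definition above) =====
theorem Count_spec : Claim_equal_Count := by
  intro matrix _ _
  unfold Spec_Count Count Count_alt
  refine PySem.List.foldl_congr_mem _ _ _ _ ?_
  intro acc i hi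
  refine PySem.List.foldl_congr_mem _ _ _ _ ?_
  intro acc2 j hj
  rw [PySem.List.mem_pyRange_one] at hi hj
  by_cases h1 : pvCell matrix i j = 1
  · simp only [h1, true_and]
    rw [cell_eq matrix _ _ i j hi hj h1]
  · have hz : pvCountA matrix (matrix.length) ((PySem.List.pyGetD matrix 0 []).length) i j = 0 := by
      rw [pvCountA, if_neg h1]
    rw [hz, if_neg (fun h => absurd h.1 (by norm_num)), if_neg (fun h => h1 h.1)]
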